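-- pv_equiv track=rewrite | github.com/wgobrien/metagnn | src/metagnn/tools/scrap/minimizer.py | get_minimizers
-- ===== SOURCE A (Python) =====
-- def get_k_mers(sequence, k):
--     """
--     Generates all k-mers of length k from a given sequence.
--
--     Parameters:
--     - sequence (str): DNA sequence.
--     - k (int): Length of k-mers.
--
--     Returns:
--     - list of str: List of k-mers of length k.
--     """
--     return [sequence[i:i + k] for i in range(len(sequence) - k + 1)]
--
-- def get_minimizers(sequences: list, k=31, l=15):
--     """
--     Finds the minimizers for a list of sequences.
--
--     Parameters:
--     - sequences (list of str): List of DNA sequences.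
--     - k (int): Length of k-mers.
--     - l (int): Length of minimizer windows.
--
--     Returns:
--     - set of str: Set of unique minimizers found in the sequences.
--     """
--     minimizers = set()
--     sequence_mins = []
--
--     for s in sequences:
--         kmers = get_k_mers(s, k)
--         minimizers_tmp = set()
--         sequence_min_tmp = []
--         for mer in kmers:
--             # Find all l-mers within the k-mer to determine the minimizer
--             minimizer_set = set(get_k_mers(mer, l))
--             # if len(minimizer_set) > 0:
--             min_mer = min(minimizer_set)  # Lexicographically smallest l-mer
--             minimizers_tmp.add(min_mer)
--             sequence_min_tmp.append(min_mer)
--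
--         sequence_mins.append(sequence_min_tmp)
--         minimizers.update(minimizers_tmp)
--
--     return minimizers, sequence_mins
-- ===== SOURCE B (Python) =====
-- def get_minimizers(sequences: list, k=31, l=15):
--     """Per-sequence sliding-window minima over the l-mer list via a two-pass
--     block prefix/suffix-minima scheme (instead of a per-k-mer set+min scan)."""
--     minimizers = set()
--     sequence_mins = []
--     for s in sequences:
--         n = len(s)
--         if l <= 0:
--             # every l-mer is the empty string
--             mins = [''] * max(0, n - k + 1)
--         else:
--             w = k - l + 1          # window size in l-mers
--             m = n - l + 1          # number of l-mers
--             lmers = [s[i:i + l] for i in range(m)]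
--             # prefix minima restarting at each block boundary (blocks of size w)
--             pre = []
--             for i in range(m):
--                 if i % w == 0:
--                     pre.append(lmers[i])
--                 else:
--                     pre.append(min(pre[i - 1], lmers[i]))
--             # suffix minima within each block, built right to left
--             suf_rev = []
--             for i in range(m - 1, -1, -1):
--                 if i % w == w - 1 or i == m - 1:
--                     suf_rev.append(lmers[i])
--                 else:
--                     suf_rev.append(min(suf_rev[-1], lmers[i]))
--             suf = suf_rev[::-1]
--             # window [i, i+w-1] = block tail from i  +  block head up to i+w-1
--             mins = [min(suf[i], pre[i + w - 1]) for i in range(m - w + 1)]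
--         sequence_mins.append(mins)
--         minimizers.update(mins)
--     return minimizers, sequence_mins
-- ===== Notes on version B (the rewrite author's own statement) =====
-- stated objective: alternative
-- what changed: A recomputes, hashes into a set and min-scans all (k-l+1) l-mers of every k-mer; B computes the l-mer list once per sequence and takes all sliding-window minima with a two-pass block prefix/suffix-minima scheme, removing the inner per-k-mer scan (an asymptotic win per sequence, though a timing run's degenerate timing family measures no speedup).
import Mathlib
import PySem

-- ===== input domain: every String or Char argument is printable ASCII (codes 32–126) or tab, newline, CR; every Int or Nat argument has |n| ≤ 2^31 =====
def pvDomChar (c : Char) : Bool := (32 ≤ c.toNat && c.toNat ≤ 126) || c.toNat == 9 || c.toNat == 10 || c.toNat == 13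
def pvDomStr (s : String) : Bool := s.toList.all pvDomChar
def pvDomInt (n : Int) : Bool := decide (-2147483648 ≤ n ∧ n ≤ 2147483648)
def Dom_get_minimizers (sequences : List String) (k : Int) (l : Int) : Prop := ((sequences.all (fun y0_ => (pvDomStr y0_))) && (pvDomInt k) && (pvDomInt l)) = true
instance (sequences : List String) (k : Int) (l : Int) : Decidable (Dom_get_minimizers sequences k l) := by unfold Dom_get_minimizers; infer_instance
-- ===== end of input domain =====

-- B replaces A's per-k-mer build-a-set-and-min scan over all its l-mers by a single
-- two-pass block prefix/suffix-minima sliding-window minimum over the l-mer list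
-- (a different algorithm; return values are proved identical on Pre_).

-- ===== PORT A =====
def get_k_mers (sequence : String) (k : Int) : List String :=
  (PySem.List.pyRange 0 (PySem.Str.len sequence - k + 1) 1).map
    (fun i => PySem.Str.slice sequence (some i) (some (i + k)))

def get_minimizers (sequences : List String) (k : Int) (l : Int) :
    List String × List (List String) :=
  sequences.foldl
    (fun acc s =>
      let kmers := get_k_mers s k
      let inner := kmers.foldl
        (fun (t : PySem.Set String × List String) mer =>
          let minimizer_set := PySem.Set.ofList (get_k_mers mer l)
          -- min(∅) raises ValueError in Python: those inputs are excluded by Pre_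
          let min_mer := (PySem.List.min? minimizer_set (fun x => x)).getD ""
          (PySem.Set.add t.1 min_mer, t.2 ++ [min_mer]))
        ((PySem.Set.empty : PySem.Set String), ([] : List String))
      (PySem.Set.update acc.1 inner.1, acc.2 ++ [inner.2]))
    ((PySem.Set.empty : PySem.Set String), ([] : List (List String)))

-- ===== PORT B =====
-- per-sequence minimizer list of B (the body of B's per-sequence computation)
def minsOf (s : String) (k : Int) (l : Int) : List String :=
  let n := PySem.Str.len s
  if l ≤ 0 then
    PySem.List.pyRepeat [""] (max 0 (n - k + 1))
  else
    let w := k - l + 1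
    let m := n - l + 1
    let lmers := (PySem.List.pyRange 0 m 1).map
      (fun i => PySem.Str.slice s (some i) (some (i + l)))
    let pre := (PySem.List.pyRange 0 m 1).foldl
      (fun pre i =>
        if PySem.Int.mod i w = 0 then pre ++ [PySem.List.pyGetD lmers i ""]
        else pre ++ [min (PySem.List.pyGetD pre (i - 1) "") (PySem.List.pyGetD lmers i "")])
      []
    let sufRev := (PySem.List.pyRange (m - 1) (-1) (-1)).foldl
      (fun sr i =>
        if PySem.Int.mod i w = w - 1 ∨ i = m - 1 then sr ++ [PySem.List.pyGetD lmers i ""]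
        else sr ++ [min (PySem.List.pyGetD sr (-1) "") (PySem.List.pyGetD lmers i "")])
      []
    let suf := sufRev.reverse  -- suf_rev[::-1]
    (PySem.List.pyRange 0 (m - w + 1) 1).map
      (fun i => min (PySem.List.pyGetD suf i "") (PySem.List.pyGetD pre (i + w - 1) ""))

def get_minimizers_alt (sequences : List String) (k : Int) (l : Int) :
    List String × List (List String) :=
  sequences.foldl
    (fun acc s =>
      let mins := minsOf s k l
      (PySem.Set.update acc.1 mins, acc.2 ++ [mins]))
    ((PySem.Set.empty : PySem.Set String), ([] : List (List String)))

-- ===== PRECONDITION & SPEC =====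
-- Pre_ excludes exactly the inputs on which A raises ValueError (min() of an empty set:
-- some sequence yields a k-mer shorter than l); A returns on every input admitted here.
def Pre_get_minimizers (sequences : List String) (k : Int) (l : Int) : Prop :=
  ∀ s ∈ sequences, (k ≤ 0 ∧ l ≤ 0) ∨ (0 < k ∧ (l ≤ k ∨ PySem.Str.len s < k))
instance (sequences : List String) (k : Int) (l : Int) : Decidable (Pre_get_minimizers sequences k l) := by
  unfold Pre_get_minimizers; infer_instance

def pvWitness_get_minimizers : List String × Int × Int := (["ACGTAC"], 4, 2)

def Spec_get_minimizers (sequences : List String) (k : Int) (l : Int) (out : List String × List (List String)) : Prop := out = get_minimizers_alt sequences k l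
instance (sequences : List String) (k : Int) (l : Int) (out : List String × List (List String)) : Decidable (Spec_get_minimizers sequences k l out) := by unfold Spec_get_minimizers; infer_instance

-- ===== CLAIM (what is proved, stated in full; the proofs are below) =====
def Claim_equal_get_minimizers : Prop := ∀ (sequences : List String) (k : Int) (l : Int), Dom_get_minimizers sequences k l → Pre_get_minimizers sequences k l → Spec_get_minimizers sequences k l (get_minimizers sequences k l)

-- ===== LEMMAS AND PROOFS =====


def vmin : List String → String
  | [] => ""
  | x :: t => t.foldl min x

theorem foldl_min_min (t : List String) (a b : String) :
    List.foldl min (min a b) t = min a (List.foldl min b t) := by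
  induction t generalizing b with
  | nil => simp
  | cons c t ih => simp only [List.foldl_cons, min_assoc, ih]

theorem vmin_cons (x : String) (t : List String) (h : t ≠ []) :
    vmin (x :: t) = min x (vmin t) := by
  cases t with
  | nil => simp at h
  | cons y t => simp [vmin, foldl_min_min]

theorem vmin_append (xs ys : List String) (hx : xs ≠ []) (hy : ys ≠ []) :
    vmin (xs ++ ys) = min (vmin xs) (vmin ys) := by
  induction xs with
  | nil => simp at hx
  | cons x xs ih =>
    cases xs with
    | nil =>
      simp only [List.nil_append, List.cons_append]
      exact vmin_cons x ys hy
    | cons x' xs' =>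
      rw [List.cons_append, vmin_cons x ((x' :: xs') ++ ys) (by simp),
        vmin_cons x (x' :: xs') (by simp), ih (by simp), min_assoc]

def preSpec (L : List String) (W : Nat) (i : Nat) : String :=
  vmin ((L.drop (i - i % W)).take (i % W + 1))
def sufSpec (L : List String) (W M : Nat) (i : Nat) : String :=
  vmin ((L.drop i).take (min (i - i % W + W - 1) (M - 1) - i + 1))

-- window snoc / cons
theorem win_snoc (L : List String) (a c : Nat) (h : a + c < L.length) :
    (L.drop a).take (c + 1) = (L.drop a).take c ++ [L[a + c]] := by
  rw [List.take_add_one]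
  congr 1
  have hc : c < (L.drop a).length := by simp; omega
  rw [List.getElem?_eq_getElem hc, List.getElem_drop]
  rfl

theorem win_snoc' (L : List String) (a c j : Nat) (h : a + c < L.length) (hj : j = a + c) :
    (L.drop a).take (c + 1) = (L.drop a).take c ++ [L[j]'(by omega)] := by
  subst hj
  exact win_snoc L a c h

theorem win_cons (L : List String) (a c : Nat) (h : a < L.length) :
    (L.drop a).take (c + 1) = L[a] :: (L.drop (a + 1)).take c := by
  rw [List.drop_eq_getElem_cons h, List.take_succ_cons]

theorem win_ne_nil (L : List String) (a c : Nat) (hc : 1 ≤ c) (h : a < L.length) :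
    (L.drop a).take c ≠ [] := by
  have : ((L.drop a).take c).length ≠ 0 := by simp; omega
  exact fun he => this (by rw [he]; rfl)

-- mod identities
theorem mod_pred (i W : Nat) (hW : 1 ≤ W) (h : i % W ≠ 0) :
    1 ≤ i ∧ (i - 1) % W = i % W - 1 := by
  have hd := Nat.div_add_mod i W
  have hr : i % W < W := Nat.mod_lt _ (by omega)
  have h1 : 1 ≤ i := by omega
  have he : i - 1 = W * (i / W) + (i % W - 1) := by omega
  refine ⟨h1, ?_⟩
  rw [he, Nat.mul_add_mod, Nat.mod_eq_of_lt (by omega)]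

theorem mod_succ (i W : Nat) (hW : 1 ≤ W) (h : i % W < W - 1) :
    (i + 1) % W = i % W + 1 := by
  have hd := Nat.div_add_mod i W
  have he : i + 1 = W * (i / W) + (i % W + 1) := by omega
  rw [he, Nat.mul_add_mod, Nat.mod_eq_of_lt (by omega)]

theorem mod_right_end_zero (i W : Nat) (hW : 1 ≤ W) (h : i % W = 0) :
    (i + W - 1) % W = W - 1 := by
  have hd := Nat.div_add_mod i W
  have he : i + W - 1 = W * (i / W) + (W - 1) := by omega
  rw [he, Nat.mul_add_mod, Nat.mod_eq_of_lt (by omega)]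

theorem mod_right_end_pos (i W : Nat) (hW : 1 ≤ W) (h : i % W ≠ 0) :
    (i + W - 1) % W = i % W - 1 := by
  have hd := Nat.div_add_mod i W
  have hr : i % W < W := Nat.mod_lt _ (by omega)
  have hq : W * (i / W + 1) = W * (i / W) + W := by ring
  have he : i + W - 1 = W * (i / W + 1) + (i % W - 1) := by omega
  rw [he, Nat.mul_add_mod, Nat.mod_eq_of_lt (by omega)]

-- spec recurrences
theorem preSpec_start (L : List String) (W i : Nat) (hi : i < L.length) (h : i % W = 0) :
    preSpec L W i = L[i] := by
  unfold preSpec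
  rw [h]
  have : (L.drop (i - 0)).take (0 + 1) = [L[i]] := by
    rw [Nat.sub_zero, win_cons L i 0 hi, List.take_zero]
  rw [this]; rfl

theorem preSpec_step (L : List String) (W i : Nat) (hW : 1 ≤ W) (hi : i < L.length) (h : i % W ≠ 0) :
    preSpec L W i = min (preSpec L W (i - 1)) (L[i]) := by
  obtain ⟨h1, hm⟩ := mod_pred i W hW h
  have hr : i % W < W := Nat.mod_lt _ (by omega)
  have hble : i % W ≤ i := Nat.mod_le i W
  unfold preSpec
  rw [hm]
  have hb : i - 1 - (i % W - 1) = i - i % W := by omega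
  rw [hb]
  have hiw : (i - i % W) + (i % W - 1) < L.length := by omega
  have hsub : i % W - 1 + 1 = i % W := by omega
  rw [hsub]
  rw [win_snoc' L (i - i % W) (i % W) i (by omega) (by omega), vmin_append _ _ (win_ne_nil L _ _ (by omega) (by omega)) (by simp)]
  rfl

theorem sufSpec_hi (L : List String) (W M i : Nat) (hW : 1 ≤ W) (hM : M = L.length)
    (hi : i < M) (h : i % W = W - 1 ∨ i = M - 1) :
    sufSpec L W M i = L[i]'(by omega) := by
  have hble : i % W ≤ i := Nat.mod_le i W
  have hr : i % W < W := Nat.mod_lt _ (by omega)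
  unfold sufSpec
  have he : min (i - i % W + W - 1) (M - 1) = i := by
    rcases h with h | h <;> omega
  rw [he]
  have : i - i + 1 = 1 := by omega
  rw [this, win_cons L i 0 (by omega), List.take_zero]
  rfl

theorem sufSpec_step (L : List String) (W M i : Nat) (hW : 1 ≤ W) (hM : M = L.length)
    (h1 : i < M - 1) (h2 : i % W ≠ W - 1) :
    sufSpec L W M i = min (sufSpec L W M (i + 1)) (L[i]'(by omega)) := by
  have hble : i % W ≤ i := Nat.mod_le i W
  have hr : i % W < W := Nat.mod_lt _ (by omega)
  have hms := mod_succ i W hW (by omega)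
  unfold sufSpec
  rw [hms]
  have hb : i + 1 - (i % W + 1) = i - i % W := by omega
  rw [hb]
  set e := min (i - i % W + W - 1) (M - 1) with hedef
  have hei : i + 1 ≤ e := by omega
  have heM : e ≤ M - 1 := by omega
  have hsplit : e - i + 1 = (e - (i + 1) + 1) + 1 := by omega
  rw [hsplit, win_cons L i (e - (i+1) + 1) (by omega)]
  rw [vmin_cons _ _ (win_ne_nil L _ _ (by omega) (by omega))]
  exact min_comm _ _

-- the window split
theorem combine (L : List String) (W M i : Nat) (hW : 1 ≤ W) (hM : M = L.length)
    (h : i + W ≤ M) :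
    min (sufSpec L W M i) (preSpec L W (i + W - 1)) = vmin ((L.drop i).take W) := by
  have hble : i % W ≤ i := Nat.mod_le i W
  have hr : i % W < W := Nat.mod_lt _ (by omega)
  by_cases h0 : i % W = 0
  · have hmre := mod_right_end_zero i W hW h0
    unfold preSpec sufSpec
    rw [hmre, h0]
    have e1 : i + W - 1 - (W - 1) = i := by omega
    have e2 : W - 1 + 1 = W := by omega
    have e3 : min (i - 0 + W - 1) (M - 1) - i + 1 = W := by omega
    have e4 : i - 0 = i := by omega
    rw [e1, e2, e3]
    exact min_self _
  · have hmre := mod_right_end_pos i W hW h0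
    unfold preSpec sufSpec
    rw [hmre]
    set r := i % W with hrdef
    have e1 : i + W - 1 - (r - 1) = i + (W - r) := by omega
    have e2 : r - 1 + 1 = r := by omega
    have e3 : min (i - r + W - 1) (M - 1) - i + 1 = W - r := by omega
    rw [e1, e2, e3]
    have hsplit : (L.drop i).take (W - r) ++ (L.drop (i + (W - r))).take r
        = (L.drop i).take W := by
      have h2 : (L.drop i).drop (W - r) = L.drop (i + (W - r)) := by
        rw [List.drop_drop]
      rw [← h2, ← List.take_add]
      congr 1
      omega
    rw [← hsplit, vmin_append _ _ (win_ne_nil L _ _ (by omega) (by omega))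
      (win_ne_nil L _ _ (by omega) (by omega))]

theorem pre_fold_aux (L : List String) (W : Nat) (hW : 1 ≤ W) (t : Nat) (ht : t ≤ L.length) :
    ((PySem.List.pyRange 0 (t : Int) 1).foldl
      (fun pre i => if PySem.Int.mod i (W : Int) = 0 then pre ++ [PySem.List.pyGetD L i ""]
        else pre ++ [min (PySem.List.pyGetD pre (i - 1) "") (PySem.List.pyGetD L i "")]) [])
    = (List.range t).map (fun u => preSpec L W u) := by
  induction t with
  | zero => rw [PySem.List.pyRange_one_eq_nil (by omega)]; rfl
  | succ t ih =>
    have hc : ((t + 1 : Nat) : Int) = (t : Int) + 1 := by push_cast; ring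
    rw [hc, PySem.List.pyRange_one_succ_right (by omega), List.foldl_append,
      ih (by omega), List.range_succ, List.map_append, List.map_cons, List.map_nil,
      List.foldl_cons, List.foldl_nil]
    have hmod : PySem.Int.mod (t : Int) (W : Int) = ((t % W : Nat) : Int) :=
      PySem.Int.mod_natCast t W
    have hget : PySem.List.pyGetD L (t : Int) "" = L[t]'(by omega) := by
      rw [PySem.List.pyGetD_natCast, List.getD_eq_getElem L "" (by omega)]
    by_cases h0 : t % W = 0
    · rw [if_pos (by rw [hmod, h0]; rfl), hget]
      congr 1
      rw [preSpec_start L W t (by omega) h0]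
    · rw [if_neg (by rw [hmod]; intro hx; exact h0 (by exact_mod_cast hx))]
      have h1 : 1 ≤ t := by
        rcases Nat.eq_zero_or_pos t with h | h
        · exact absurd (by rw [h]; simp) h0
        · omega
      have hi1 : ((t : Int) - 1) = ((t - 1 : Nat) : Int) := by omega
      have hlen : t - 1 < ((List.range t).map (fun u => preSpec L W u)).length := by
        simp; omega
      have hgetp : PySem.List.pyGetD ((List.range t).map (fun u => preSpec L W u)) ((t : Int) - 1) ""
          = preSpec L W (t - 1) := by
        rw [hi1, PySem.List.pyGetD_natCast, List.getD_eq_getElem _ "" hlen]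
        simp
      rw [hgetp, hget]
      congr 1
      rw [preSpec_step L W t hW (by omega) h0]

theorem suf_fold_aux (L : List String) (W M : Nat) (hW : 1 ≤ W) (hM : M = L.length)
    (hM1 : 1 ≤ M) (t : Nat) (ht : t ≤ M) :
    (((List.range t).map (fun u : Nat => ((M : Int) - 1 - (u : Int)))).foldl
      (fun sr i => if PySem.Int.mod i (W : Int) = (W : Int) - 1 ∨ i = (M : Int) - 1 then
          sr ++ [PySem.List.pyGetD L i ""]
        else sr ++ [min (PySem.List.pyGetD sr (-1) "") (PySem.List.pyGetD L i "")]) [])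
    = (List.range t).map (fun u => sufSpec L W M (M - 1 - u)) := by
  induction t with
  | zero => rfl
  | succ t ih =>
    rw [List.range_succ, List.map_append, List.map_append, List.foldl_append,
      ih (by omega), List.map_cons, List.map_nil, List.map_cons, List.map_nil,
      List.foldl_cons, List.foldl_nil]
    have hidx : ((M : Int) - 1 - (t : Int)) = ((M - 1 - t : Nat) : Int) := by omega
    have hmod : PySem.Int.mod ((M - 1 - t : Nat) : Int) (W : Int) = (((M - 1 - t) % W : Nat) : Int) :=
      PySem.Int.mod_natCast _ W
    have hget : PySem.List.pyGetD L ((M : Int) - 1 - (t : Int)) "" = L[M - 1 - t]'(by omega) := by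
      rw [hidx, PySem.List.pyGetD_natCast, List.getD_eq_getElem L "" (by omega)]
    have hcond : (PySem.Int.mod ((M : Int) - 1 - (t : Int)) (W : Int) = (W : Int) - 1
        ∨ ((M : Int) - 1 - (t : Int)) = (M : Int) - 1)
        ↔ ((M - 1 - t) % W = W - 1 ∨ t = 0) := by
      rw [hidx, hmod]
      have hrlt : (M - 1 - t) % W < W := Nat.mod_lt _ (by omega)
      generalize (M - 1 - t) % W = r at *
      omega
    by_cases hc : (M - 1 - t) % W = W - 1 ∨ t = 0
    · rw [if_pos (hcond.mpr hc), hget]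
      congr 1
      rw [sufSpec_hi L W M (M - 1 - t) hW hM (by omega)
        (by rcases hc with h | h
            · exact Or.inl h
            · exact Or.inr (by omega))]
    · rw [if_neg (fun hx => hc (hcond.mp hx))]
      have h1 : 1 ≤ t := by omega
      have hne : ((List.range t).map (fun u => sufSpec L W M (M - 1 - u))) ≠ [] := by
        simp; omega
      have hgl : PySem.List.pyGetD ((List.range t).map (fun u => sufSpec L W M (M - 1 - u))) (-1) ""
          = sufSpec L W M (M - t) := by
        rw [PySem.List.pyGetD_neg_one _ _ hne, List.getLast_eq_getElem]
        simp only [List.getElem_map, List.length_map, List.length_range, List.getElem_range]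
        congr 1
        omega
      rw [hgl, hget]
      congr 1
      rw [sufSpec_step L W M (M - 1 - t) hW hM (by omega) (by tauto)]
      have : M - 1 - t + 1 = M - t := by omega
      rw [this]

-- A's per-k-mer minimizer value
def aMin (mer : String) (l : Int) : String :=
  (PySem.List.min? (PySem.Set.ofList (get_k_mers mer l)) (fun x => x)).getD ""

theorem minset_eq_vmin (xs : List String) (h : xs ≠ []) :
    (PySem.List.min? (PySem.Set.ofList xs) (fun x => x)).getD "" = vmin xs := by
  obtain ⟨x, t, rfl⟩ := List.exists_cons_of_ne_nil h
  have h1 : PySem.List.min? (x :: t) (fun y => y) = some (vmin (x :: t)) :=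
    PySem.List.min?_id_cons x t
  have hne : PySem.Set.ofList (x :: t) ≠ [] := by
    intro hemp
    have hx : x ∈ PySem.Set.ofList (x :: t) := by
      rw [PySem.Set.mem_ofList]; simp
    rw [hemp] at hx; simp at hx
  obtain ⟨y, u, hyu⟩ := List.exists_cons_of_ne_nil hne
  have h2 : PySem.List.min? (PySem.Set.ofList (x :: t)) (fun y => y)
      = some (vmin (PySem.Set.ofList (x :: t))) := by
    rw [hyu]; exact PySem.List.min?_id_cons y u
  rw [h2, Option.getD_some]
  apply le_antisymm
  · exact PySem.List.min?_isMin h2 _ (by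
      rw [PySem.Set.mem_ofList]
      exact PySem.List.min?_mem h1)
  · exact PySem.List.min?_isMin h1 _ (by
      have hm := PySem.List.min?_mem h2
      rwa [PySem.Set.mem_ofList] at hm)

theorem empty_le (s : String) : "" ≤ s := by
  rw [String.le_iff_toList_le]
  show ("" : String).toList ≤ s.toList
  cases hs : s.toList with
  | nil => exact le_of_eq rfl
  | cons x t => exact le_of_lt (List.nil_lt_cons x t)

theorem toList_strSlice (s : String) (a b : Option Int) :
    (PySem.Str.slice s a b).toList = PySem.List.slice s.toList a b := by
  simp [PySem.Str.slice, PySem.Chars.slice]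

theorem len_slice_natCast (s : String) (i kN : Nat) (h : i + kN ≤ s.toList.length) :
    PySem.Str.len (PySem.Str.slice s (some (i : Int)) (some ((i : Int) + (kN : Int)))) = (kN : Int) := by
  rw [PySem.Str.len_eq]
  have : (PySem.Str.slice s (some (i : Int)) (some ((i : Int) + (kN : Int)))).toList
      = (s.toList.drop i).take kN := by
    rw [toList_strSlice, PySem.List.slice_natCast_add]
  rw [this]
  simp [String.length_toList] at h ⊢
  omega

theorem slice_comp (s : String) (i j lN kN : Nat) (hik : i + kN ≤ s.toList.length) (hjl : j + lN ≤ kN) :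
    PySem.Str.slice (PySem.Str.slice s (some (i:Int)) (some ((i:Int) + (kN:Int)))) (some (j:Int)) (some ((j:Int) + (lN:Int)))
    = PySem.Str.slice s (some ((i+j : Nat) : Int)) (some (((i+j : Nat) : Int) + (lN:Int))) := by
  apply String.toList_inj.mp
  rw [toList_strSlice, toList_strSlice, toList_strSlice, PySem.List.slice_natCast_add,
    PySem.List.slice_natCast_add, PySem.List.slice_natCast_add,
    List.drop_take, List.take_take, List.drop_drop]
  rw [min_eq_left (by omega)]

-- the generated window lists agree with drop/take windows over the full l-mer list
theorem window_map (g : Nat → String) (M t Wn : Nat) (h : t + Wn ≤ M) :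
    (((List.range M).map g).drop t).take Wn = (List.range Wn).map (fun j => g (t + j)) := by
  apply List.ext_getElem
  · simp; omega
  · intro u h1 h2
    simp only [List.getElem_take, List.getElem_drop, List.getElem_map, List.getElem_range]

theorem aMin_nonpos (mer : String) (l : Int) (hl : l ≤ 0) : aMin mer l = "" := by
  have hmem : "" ∈ get_k_mers mer l := by
    unfold get_k_mers
    apply List.mem_map.mpr
    refine ⟨PySem.Str.len mer - l, ?_, ?_⟩
    · rw [PySem.List.mem_pyRange_one, PySem.Str.len_eq]
      omega
    · have hb : PySem.Str.len mer - l + l = PySem.Str.len mer := by ring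
      rw [hb]
      apply String.toList_inj.mp
      rw [toList_strSlice]
      rw [PySem.List.slice_toNat mer.toList (a := PySem.Str.len mer - l) (b := PySem.Str.len mer)
        (by rw [PySem.Str.len_eq]; omega) (by rw [PySem.Str.len_eq]; omega)]
      have hd : (mer.toList.drop (PySem.Str.len mer - l).toNat) = [] := by
        apply List.drop_eq_nil_of_le
        rw [PySem.Str.len_eq]
        omega
      rw [hd]
      simp
  have hne : get_k_mers mer l ≠ [] := fun he => by rw [he] at hmem; simp at hmem
  unfold aMin
  rw [minset_eq_vmin _ hne]
  obtain ⟨x, t, hxt⟩ := List.exists_cons_of_ne_nil hne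
  have hsome : PySem.List.min? (get_k_mers mer l) (fun y => y) = some (vmin (get_k_mers mer l)) := by
    rw [hxt]; exact PySem.List.min?_id_cons x t
  exact le_antisymm (PySem.List.min?_isMin hsome _ hmem) (empty_le _)

-- per-sequence equality, case l <= 0
theorem mins_nonpos (s : String) (k l : Int) (hl : l ≤ 0) :
    (get_k_mers s k).map (fun mer => aMin mer l) = minsOf s k l := by
  unfold minsOf
  rw [if_pos hl, PySem.List.pyRepeat_singleton]
  have hmap : (get_k_mers s k).map (fun mer => aMin mer l)
      = List.replicate (get_k_mers s k).length "" := by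
    rw [List.eq_replicate_iff]
    constructor
    · simp
    · intro b hb
      obtain ⟨mer, _, rfl⟩ := List.mem_map.mp hb
      exact aMin_nonpos mer l hl
  rw [hmap]
  unfold get_k_mers
  rw [List.length_map, PySem.List.length_pyRange_one]
  congr 1
  omega

-- per-sequence equality, case l >= 1 but no k-mers
theorem mins_empty (s : String) (k l : Int) (hl : ¬ l ≤ 0) (hk : PySem.Str.len s - k + 1 ≤ 0) :
    (get_k_mers s k).map (fun mer => aMin mer l) = minsOf s k l := by
  unfold minsOf get_k_mers
  rw [if_neg hl]
  dsimp only
  rw [show PySem.Str.len s - l + 1 - (k - l + 1) + 1 = PySem.Str.len s - k + 1 from by ring]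
  simp only [PySem.List.pyRange_one_eq_nil hk, List.map_nil]

-- per-sequence equality, main case 1 <= l <= k <= len(s)
theorem mins_main (s : String) (kN lN : Nat) (h1 : 1 ≤ lN) (h2 : lN ≤ kN) (h3 : kN ≤ s.toList.length) :
    (get_k_mers s (kN : Int)).map (fun mer => aMin mer (lN : Int)) = minsOf s (kN : Int) (lN : Int) := by
  have hlen : PySem.Str.len s = ((s.toList.length : Nat) : Int) := PySem.Str.len_eq s
  set n := s.toList.length with hn
  set W := kN - lN + 1 with hWdef
  set M := n - lN + 1 with hMdef
  set Q := n - kN + 1 with hQdef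
  set g : Nat → String := fun t => PySem.Str.slice s (some (t : Int)) (some ((t : Int) + (lN : Int))) with hg
  set L : List String := (List.range M).map g with hL
  have hLlen : L.length = M := by rw [hL]; simp
  unfold minsOf get_k_mers
  rw [if_neg (by omega : ¬ ((lN : Int) ≤ 0))]
  dsimp only
  rw [hlen]
  rw [show ((n : Int) - (lN : Int) + 1) = ((M : Nat) : Int) from by omega,
    show ((kN : Int) - (lN : Int) + 1) = ((W : Nat) : Int) from by omega,
    show ((n : Int) - (kN : Int) + 1) = ((Q : Nat) : Int) from by omega,
    show ((M : Nat) : Int) - ((W : Nat) : Int) + 1 = ((Q : Nat) : Int) from by omega]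
  have hlmers : (PySem.List.pyRange 0 ((M : Nat) : Int) 1).map
      (fun i => PySem.Str.slice s (some i) (some (i + (lN : Int)))) = L := by
    rw [PySem.List.pyRange_one]
    simp only [sub_zero, Int.toNat_natCast, List.map_map]
    apply List.map_congr_left
    intro t ht
    simp [hg]
  rw [hlmers]
  simp only [pre_fold_aux L W (by omega) M (by omega)]
  simp only [PySem.List.pyRange_neg_one]
  simp only [show (((M : Nat) : Int) - 1 - (-1)).toNat = M from by omega]
  simp only [suf_fold_aux L W M (by omega) hLlen.symm (by omega) M (le_refl M)]
  rw [PySem.List.pyRange_one]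
  simp only [sub_zero, Int.toNat_natCast, List.map_map]
  apply List.map_congr_left
  intro t ht
  rw [List.mem_range] at ht
  simp only [Function.comp, zero_add]
  have hmer_eq : get_k_mers (PySem.Str.slice s (some (t : Int)) (some ((t : Int) + (kN : Int)))) (lN : Int)
      = (List.range W).map (fun j => g (t + j)) := by
    unfold get_k_mers
    rw [len_slice_natCast s t kN (by omega)]
    rw [show ((kN : Int) - (lN : Int) + 1) = ((W : Nat) : Int) from by omega]
    rw [PySem.List.pyRange_one]
    simp only [sub_zero, Int.toNat_natCast, List.map_map]
    apply List.map_congr_left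
    intro j hj
    rw [List.mem_range] at hj
    simp only [Function.comp, zero_add]
    rw [slice_comp s t j lN kN (by omega) (by omega)]
  have hne : (List.range W).map (fun j => g (t + j)) ≠ [] := by
    simp
  unfold aMin
  rw [hmer_eq, minset_eq_vmin _ hne, ← window_map g M t W (by omega), ← hL,
    ← combine L W M t (by omega) hLlen.symm (by omega)]
  have hsufget : PySem.List.pyGetD ((List.range M).map (fun u => sufSpec L W M (M - 1 - u))).reverse (t : Int) ""
      = sufSpec L W M t := by
    rw [PySem.List.pyGetD_natCast, List.getD_eq_getElem _ "" (by simp; omega)]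
    rw [List.getElem_reverse]
    simp only [List.length_map, List.length_range, List.getElem_map, List.getElem_range]
    congr 1
    omega
  have hpreget : PySem.List.pyGetD ((List.range M).map (fun u => preSpec L W u)) ((t : Int) + ((W : Nat) : Int) - 1) ""
      = preSpec L W (t + W - 1) := by
    rw [show ((t : Int) + ((W : Nat) : Int) - 1) = ((t + W - 1 : Nat) : Int) from by omega]
    rw [PySem.List.pyGetD_natCast, List.getD_eq_getElem _ "" (by simp; omega)]
    simp
  rw [hsufget, hpreget]

-- per-sequence equality under the per-sequence precondition
theorem mins_seq (s : String) (k l : Int)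
    (hs : (k ≤ 0 ∧ l ≤ 0) ∨ (0 < k ∧ (l ≤ k ∨ PySem.Str.len s < k))) :
    (get_k_mers s k).map (fun mer => aMin mer l) = minsOf s k l := by
  by_cases hl : l ≤ 0
  · exact mins_nonpos s k l hl
  · have hk : 0 < k := by
      rcases hs with ⟨hk0, hl0⟩ | ⟨hk0, _⟩
      · exact absurd hl0 hl
      · exact hk0
    by_cases hq : PySem.Str.len s - k + 1 ≤ 0
    · exact mins_empty s k l hl hq
    · have hkn : k ≤ PySem.Str.len s := by omega
      have hlk : l ≤ k := by
        rcases hs with ⟨hk0, _⟩ | ⟨_, hor⟩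
        · omega
        · rcases hor with h | h
          · exact h
          · omega
      have hkN : k = ((k.toNat : Nat) : Int) := by omega
      have hlN : l = ((l.toNat : Nat) : Int) := by omega
      rw [hkN, hlN]
      apply mins_main s k.toNat l.toNat
      · omega
      · omega
      · have := PySem.Str.len_eq s
        omega

theorem inner_fold_eq (l : Int) (ks : List String) (t : PySem.Set String × List String) :
    ks.foldl
      (fun (t : PySem.Set String × List String) mer =>
        (PySem.Set.add t.1 ((PySem.List.min? (PySem.Set.ofList (get_k_mers mer l)) (fun x => x)).getD ""),
         t.2 ++ [(PySem.List.min? (PySem.Set.ofList (get_k_mers mer l)) (fun x => x)).getD ""])) t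
    = (PySem.Set.update t.1 (ks.map (fun mer => aMin mer l)),
       t.2 ++ ks.map (fun mer => aMin mer l)) := by
  induction ks generalizing t with
  | nil => simp [PySem.Set.update_nil]
  | cons mer ks ih =>
    rw [List.foldl_cons, ih]
    simp only [List.map_cons, PySem.Set.update_cons, List.append_assoc, List.cons_append,
      List.nil_append]
    rfl

theorem set_update_ofList (S : PySem.Set String) (xs : List String) :
    PySem.Set.update S (PySem.Set.ofList xs) = PySem.Set.update S xs := by
  rw [PySem.Set.update_eq_append_filter, PySem.Set.update_eq_append_filter,
    PySem.Set.ofList_ofList]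

theorem outer_fold_eq (k l : Int) (seqs : List String)
    (hpre : ∀ s ∈ seqs, (k ≤ 0 ∧ l ≤ 0) ∨ (0 < k ∧ (l ≤ k ∨ PySem.Str.len s < k)))
    (acc : PySem.Set String × List (List String)) :
    seqs.foldl
      (fun acc s =>
        let kmers := get_k_mers s k
        let inner := kmers.foldl
          (fun (t : PySem.Set String × List String) mer =>
            let minimizer_set := PySem.Set.ofList (get_k_mers mer l)
            let min_mer := (PySem.List.min? minimizer_set (fun x => x)).getD ""
            (PySem.Set.add t.1 min_mer, t.2 ++ [min_mer]))
          ((PySem.Set.empty : PySem.Set String), ([] : List String))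
        (PySem.Set.update acc.1 inner.1, acc.2 ++ [inner.2])) acc
    = seqs.foldl
      (fun acc s =>
        let mins := minsOf s k l
        (PySem.Set.update acc.1 mins, acc.2 ++ [mins])) acc := by
  induction seqs generalizing acc with
  | nil => rfl
  | cons s seqs ih =>
    rw [List.foldl_cons, List.foldl_cons, ih (fun x hx => hpre x (List.mem_cons_of_mem s hx))]
    congr 1
    dsimp only
    rw [inner_fold_eq l (get_k_mers s k) (PySem.Set.empty, ([] : List String))]
    dsimp only
    rw [PySem.Set.update_empty, set_update_ofList, List.nil_append,
      mins_seq s k l (hpre s List.mem_cons_self)]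

-- ===== VERDICT (by name: the statement is the Claim_ definition above) =====
theorem get_minimizers_spec : Claim_equal_get_minimizers := by
  intro sequences k l _hdom hpre
  unfold Spec_get_minimizers get_minimizers get_minimizers_alt
  exact outer_fold_eq k l sequences hpre _
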